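-- pv_equiv track=rewrite | github.com/yusuchn/codekata | AlphaPuzzle/alphasolver.py | extract_candidate_words_from_dictionary
-- ===== SOURCE A (Python) =====
-- def extract_candidate_words_from_dictionary(number_list_of_the_word_param, dictionary_param,
--                                             fixed_number_letters_param):
--     number_list_len = len(number_list_of_the_word_param)
--     candidate_word_list = list()
--     # NOTE, do not use dict to pair the index and letter because there may be duplicated number/letters in a word
--     # fixed_letter_index_in_word and fixed_letter_letter_in_word should be of equal length
--     fixed_letter_index_in_word = list()
--     fixed_letter_letter_in_word = list()
--     for i in range(number_list_len):
--         if number_list_of_the_word_param[i] in fixed_number_letters_param: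
--             fixed_letter_index_in_word.append(i)
--             fixed_letter_letter_in_word.append(fixed_number_letters_param[number_list_of_the_word_param[i]])
--     for word in dictionary_param:
--         if len(word) == number_list_len:
--             is_candidate = True
--             for j in range(len(fixed_letter_index_in_word)):
--                 if word[fixed_letter_index_in_word[j]] != fixed_letter_letter_in_word[j].lower():
--                     is_candidate = False
--                     break
--             if(is_candidate):
--                 candidate_word_list.append(word)
--     return candidate_word_list
-- ===== SOURCE B (Python) =====
-- def extract_candidate_words_from_dictionary(number_list_of_the_word_param, dictionary_param,
--                                             fixed_number_letters_param):
--     # Constraint-major staged filtering: start from the words of the right length,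
--     # then narrow the candidate list once per constrained position.
--     candidates = [w for w in dictionary_param
--                   if len(w) == len(number_list_of_the_word_param)]
--     for i, num in enumerate(number_list_of_the_word_param):
--         if num in fixed_number_letters_param:
--             ch = fixed_number_letters_param[num].lower()
--             candidates = [w for w in candidates if w[i] == ch]
--     return candidates
-- ===== Notes on version B (the rewrite author's own statement) =====
-- stated objective: alternative
-- what changed: Replaced A's word-major scan (precomputed parallel index/letter lists, then one inner constraint loop per word) with constraint-major staged filtering: B first keeps the words of the right length, then makes one narrowing pass over the candidate list per constrained position of the number list.
import Mathlib
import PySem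

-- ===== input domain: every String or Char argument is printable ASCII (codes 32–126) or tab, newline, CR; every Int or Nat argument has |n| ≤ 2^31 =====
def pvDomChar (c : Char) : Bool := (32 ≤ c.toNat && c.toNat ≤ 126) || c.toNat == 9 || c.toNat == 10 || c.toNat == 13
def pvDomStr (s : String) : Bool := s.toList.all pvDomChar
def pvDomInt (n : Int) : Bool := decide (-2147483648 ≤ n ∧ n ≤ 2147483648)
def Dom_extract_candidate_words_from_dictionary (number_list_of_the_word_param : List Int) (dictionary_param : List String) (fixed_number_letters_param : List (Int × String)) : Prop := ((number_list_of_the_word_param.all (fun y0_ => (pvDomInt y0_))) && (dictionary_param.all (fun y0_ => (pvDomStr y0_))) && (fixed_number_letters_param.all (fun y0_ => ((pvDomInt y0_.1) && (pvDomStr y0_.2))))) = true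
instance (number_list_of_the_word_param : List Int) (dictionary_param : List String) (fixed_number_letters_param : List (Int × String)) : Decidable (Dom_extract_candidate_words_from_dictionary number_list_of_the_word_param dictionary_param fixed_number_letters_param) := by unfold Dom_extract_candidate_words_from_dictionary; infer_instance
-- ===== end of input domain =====

-- B replaces A's word-major scan (precomputed parallel index/letter lists + inner loop per word)
-- with constraint-major staged filtering: keep the right-length words, then one narrowing pass
-- over the candidate list per constrained position; objective: alternative (same answer, same order).

-- Python-dict membership/lookup on the association list (first match), shared primitive
def pvLookup (d : List (Int × String)) (k : Int) : Option String :=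
  (d.find? (fun p => p.1 == k)).map (·.2)

-- ===== PORT A =====
-- A's inner 'for j in range(len(fixed_letter_index_in_word))' loop with its break
def pvCheckIdx (word : List Char) (idxs : List Int) (lets : List String) : List Int → Bool
  | [] => true
  | j :: js =>
    if [PySem.List.pyGetD word (PySem.List.pyGetD idxs j 0) ' '] ≠
        (PySem.Str.lower (PySem.List.pyGetD lets j "")).toList then false
    else pvCheckIdx word idxs lets js

def extract_candidate_words_from_dictionary (number_list_of_the_word_param : List Int) (dictionary_param : List String) (fixed_number_letters_param : List (Int × String)) : List String :=
  let numberListLen : Int := number_list_of_the_word_param.length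
  -- first loop: build the two parallel lists fixed_letter_index_in_word / fixed_letter_letter_in_word
  let precomp : List Int × List String :=
    (PySem.List.pyRange 0 numberListLen 1).foldl (fun acc i =>
      match pvLookup fixed_number_letters_param (PySem.List.pyGetD number_list_of_the_word_param i 0) with
      | some l => (acc.1 ++ [i], acc.2 ++ [l])
      | none => acc) ([], [])
  -- second loop: filter the dictionary
  dictionary_param.foldl (fun cand word =>
    if PySem.Str.len word == numberListLen then
      if pvCheckIdx word.toList precomp.1 precomp.2
          (PySem.List.pyRange 0 (precomp.1.length : Int) 1) then cand ++ [word]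
      else cand
    else cand) []

-- ===== PORT B =====
def extract_candidate_words_from_dictionary_alt (number_list_of_the_word_param : List Int) (dictionary_param : List String) (fixed_number_letters_param : List (Int × String)) : List String :=
  -- stage 0: the words of the right length
  let candidates : List String := dictionary_param.filter
    (fun w => PySem.Str.len w == (number_list_of_the_word_param.length : Int))
  -- one narrowing pass per constrained position of enumerate(number_list)
  (PySem.List.enumerate number_list_of_the_word_param).foldl (fun cs p =>
    match pvLookup fixed_number_letters_param p.2 with
    | some l => cs.filter (fun w =>
        [PySem.List.pyGetD w.toList p.1 ' '] == (PySem.Str.lower l).toList)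
    | none => cs) candidates

-- ===== PRECONDITION & SPEC =====
def Spec_extract_candidate_words_from_dictionary (number_list_of_the_word_param : List Int) (dictionary_param : List String) (fixed_number_letters_param : List (Int × String)) (out : List String) : Prop := out = extract_candidate_words_from_dictionary_alt number_list_of_the_word_param dictionary_param fixed_number_letters_param
instance (number_list_of_the_word_param : List Int) (dictionary_param : List String) (fixed_number_letters_param : List (Int × String)) (out : List String) : Decidable (Spec_extract_candidate_words_from_dictionary number_list_of_the_word_param dictionary_param fixed_number_letters_param out) := by unfold Spec_extract_candidate_words_from_dictionary; infer_instance

-- ===== CLAIM (what is proved, stated in full; the proofs are below) =====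
def Claim_equal_extract_candidate_words_from_dictionary : Prop := ∀ (number_list_of_the_word_param : List Int) (dictionary_param : List String) (fixed_number_letters_param : List (Int × String)), Dom_extract_candidate_words_from_dictionary number_list_of_the_word_param dictionary_param fixed_number_letters_param → Spec_extract_candidate_words_from_dictionary number_list_of_the_word_param dictionary_param fixed_number_letters_param (extract_candidate_words_from_dictionary number_list_of_the_word_param dictionary_param fixed_number_letters_param)

-- ===== LEMMAS AND PROOFS =====

-- the constrained positions with their fixed letters, read off an enumerate list
def pvFilt (fnl : List (Int × String)) (es : List (Int × Int)) : List (Int × String) :=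
  es.filterMap (fun p => (pvLookup fnl p.2).map (fun l => (p.1, l)))

-- the per-position test both programs perform
def pvTest (word : List Char) (p : Int × String) : Bool :=
  [PySem.List.pyGetD word p.1 ' '] = (PySem.Str.lower p.2).toList

-- A's precomputation fold produces exactly the two projections of pvFilt
theorem pvPre_eq (fnl : List (Int × String)) (es : List (Int × Int)) (L1 : List Int) (L2 : List String) :
    es.foldl (fun acc p =>
      match pvLookup fnl p.2 with
      | some l => (acc.1 ++ [p.1], acc.2 ++ [l])
      | none => acc) (L1, L2)
    = (L1 ++ (pvFilt fnl es).map (·.1), L2 ++ (pvFilt fnl es).map (·.2)) := by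
  induction es generalizing L1 L2 with
  | nil => simp [pvFilt]
  | cons p t ih =>
    cases h : pvLookup fnl p.2 with
    | none => simp [pvFilt, h, ih]
    | some l => simp [pvFilt, h, ih]

-- the early-exit index loop is an 'all' over the index list
theorem pvCheckIdx_eq_all (word : List Char) (idxs : List Int) (lets : List String) (js : List Int) :
    pvCheckIdx word idxs lets js
    = js.all (fun j => [PySem.List.pyGetD word (PySem.List.pyGetD idxs j 0) ' ']
        = (PySem.Str.lower (PySem.List.pyGetD lets j "")).toList) := by
  induction js with
  | nil => rfl
  | cons j t ih => by_cases h : [PySem.List.pyGetD word (PySem.List.pyGetD idxs j 0) ' ']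
        = (PySem.Str.lower (PySem.List.pyGetD lets j "")).toList <;>
      simp [pvCheckIdx, h, ih]

-- A's check over the parallel lists of fs = the conjunction of the tests over fs itself
theorem pvCheckIdx_eq_all_fs (word : List Char) (fs : List (Int × String)) :
    pvCheckIdx word (fs.map (·.1)) (fs.map (·.2))
      (PySem.List.pyRange 0 ((fs.map (·.1)).length : Int) 1) = fs.all (pvTest word) := by
  rw [pvCheckIdx_eq_all]
  have hlen : ((fs.map (·.1)).length : Int) = PySem.List.len fs := by
    simp [PySem.List.len]
  rw [hlen]
  conv_rhs => rw [← PySem.List.map_pyGetD_pyRange_zero fs ((0 : Int), ("" : String)), List.all_map]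
  congr 1
  funext j
  have h1 := PySem.List.pyGetD_map (fun p : Int × String => p.1) fs j ((0:Int), ("":String))
  have h2 := PySem.List.pyGetD_map (fun p : Int × String => p.2) fs j ((0:Int), ("":String))
  simp only at h1 h2
  simp only [Function.comp, pvTest]
  rw [h1, h2]

-- B's staged narrowing fold filters by the conjunction of the constraints it visits
theorem pvStaged_eq (fnl : List (Int × String)) (es : List (Int × Int)) (cs : List String) :
    es.foldl (fun cs p =>
      match pvLookup fnl p.2 with
      | some l => cs.filter (fun w =>
          [PySem.List.pyGetD w.toList p.1 ' '] == (PySem.Str.lower l).toList)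
      | none => cs) cs
    = cs.filter (fun w => (pvFilt fnl es).all (pvTest w.toList)) := by
  induction es generalizing cs with
  | nil => simp [pvFilt]
  | cons p t ih =>
    obtain ⟨i, num⟩ := p
    cases h : pvLookup fnl num with
    | none => simp only [List.foldl_cons, h]; rw [ih]; simp [pvFilt, h]
    | some l =>
      simp only [List.foldl_cons, h]
      rw [ih, List.filter_filter]
      simp [pvFilt, h, pvTest, Bool.and_comm, beq_eq_decide]

-- ===== VERDICT (by name: the statement is the Claim_ definition above) =====
theorem extract_candidate_words_from_dictionary_spec : Claim_equal_extract_candidate_words_from_dictionary := by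
  intro nl dict fnl _
  show _ = _
  unfold extract_candidate_words_from_dictionary extract_candidate_words_from_dictionary_alt
  have hen := PySem.List.enumerate_eq_map_pyRange nl (0 : Int)
  have hlen : PySem.List.len nl = (nl.length : Int) := by simp [PySem.List.len]
  have hfold :
      (PySem.List.pyRange 0 (nl.length : Int) 1).foldl (fun acc i =>
        match pvLookup fnl (PySem.List.pyGetD nl i 0) with
        | some l => (acc.1 ++ [i], acc.2 ++ [l])
        | none => acc) (([] : List Int), ([] : List String))
      = ((pvFilt fnl (PySem.List.enumerate nl)).map (·.1),
         (pvFilt fnl (PySem.List.enumerate nl)).map (·.2)) := by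
    have hh :
        (PySem.List.pyRange 0 ((nl.length : Int))).foldl (fun acc i =>
          match pvLookup fnl (PySem.List.pyGetD nl i 0) with
          | some l => (acc.1 ++ [i], acc.2 ++ [l])
          | none => acc) (([] : List Int), ([] : List String))
        = (PySem.List.enumerate nl).foldl (fun acc p =>
          match pvLookup fnl p.2 with
          | some l => (acc.1 ++ [p.1], acc.2 ++ [l])
          | none => acc) (([] : List Int), ([] : List String)) := by
      rw [hen, hlen, List.foldl_map]
    rw [hh, pvPre_eq]
    simp
  simp only [hfold]
  rw [pvStaged_eq]
  have hbody : ∀ (cand : List String) (word : String),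
      (if PySem.Str.len word == (nl.length : Int) then
        if pvCheckIdx word.toList ((pvFilt fnl (PySem.List.enumerate nl)).map (·.1))
            ((pvFilt fnl (PySem.List.enumerate nl)).map (·.2))
            (PySem.List.pyRange 0 (((pvFilt fnl (PySem.List.enumerate nl)).map (·.1)).length : Int) 1)
          then cand ++ [word] else cand
      else cand)
      = (if (PySem.Str.len word == (nl.length : Int) &&
            (pvFilt fnl (PySem.List.enumerate nl)).all (pvTest word.toList)) then cand ++ [word] else cand) := by
    intro cand word
    rw [pvCheckIdx_eq_all_fs]
    by_cases h1 : word.length = nl.length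
    · by_cases h2 : (pvFilt fnl (PySem.List.enumerate nl)).all (pvTest word.toList) <;> simp [h1, h2]
    · simp [h1]
  calc dict.foldl _ [] = dict.foldl (fun cand word =>
        if (PySem.Str.len word == (nl.length : Int) &&
            (pvFilt fnl (PySem.List.enumerate nl)).all (pvTest word.toList)) then cand ++ [word] else cand) [] := by
        apply PySem.List.foldl_congr_mem
        intro cand word _
        exact hbody cand word
    _ = _ := by
        rw [PySem.List.foldl_append_if_eq_filter]
        rw [List.filter_filter]
        simp [Bool.and_comm]
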